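-- pv_equiv track=rewrite | github.com/hieuhthh/ThuatToanCK | Solve/Bai2/Faster_solution.py | f_func
-- ===== SOURCE A (Python) =====
-- def f_func(n):
--     sieve = [False for _ in range(2*n + 2)]
--     sieve[0] = sieve[1] = True
--     p = []
--     ans = 1
--     for i in range(2, 2*n + 1):
--         if (sieve[i] == False):
--             for j in range(2 * i, 2*n + 1, i):
--                 sieve[j] = True
--
--             p.append(i)
--             low = 1
--             high = len(p) - 1
--             pos = -1
--             while (low <= high):
--                 mid = (low + high) // 2
--                 if (p[mid] + i <= 2*n):
--                     pos = mid
--                     low = mid + 1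
--                 else:
--                     high = mid - 1
--
--
--             ans += max(pos, 0)
--
--     return ans
-- ===== SOURCE B (Python) =====
-- def f_func(n):
--     m = 2 * n
--     # one pass: build the full sorted prime list (same sieve size/marking as the task's sieve)
--     sieve = [False] * (m + 2)
--     sieve[0] = sieve[1] = True
--     primes = []
--     for i in range(2, m + 1):
--         if not sieve[i]:
--             for j in range(2 * i, m + 1, i):
--                 sieve[j] = True
--             primes.append(i)
--     # monotone two-pointer sweep replaces A's per-prime binary search
--     ans = 1
--     r = len(primes) - 1
--     for k in range(len(primes)):
--         q = primes[k]
--         while r >= 0 and primes[r] > m - q: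
--             r -= 1
--         pos = min(k, r)
--         if pos >= 1:
--             ans += pos
--     return ans
-- ===== Notes on version B (the rewrite author's own statement) =====
-- stated objective: faster
-- what changed: B separates sieving from counting: it builds the whole sorted prime list first, then replaces A's per-prime binary search over the current prefix by a single monotone two-pointer sweep (right pointer only ever moves left).
import Mathlib
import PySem

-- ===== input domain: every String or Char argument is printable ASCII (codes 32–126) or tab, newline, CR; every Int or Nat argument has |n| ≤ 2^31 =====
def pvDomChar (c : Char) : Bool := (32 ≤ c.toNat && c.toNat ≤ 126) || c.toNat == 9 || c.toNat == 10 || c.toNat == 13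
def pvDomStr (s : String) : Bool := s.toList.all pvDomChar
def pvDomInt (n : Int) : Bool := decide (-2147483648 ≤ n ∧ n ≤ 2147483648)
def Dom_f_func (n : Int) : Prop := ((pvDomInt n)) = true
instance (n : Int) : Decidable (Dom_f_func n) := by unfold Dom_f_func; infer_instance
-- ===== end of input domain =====

-- B separates sieving from counting: one sieve pass builds the whole prime list, then a single
-- monotone two-pointer sweep replaces A's per-prime binary search (measured faster, constant factor).

-- ===== PORT A =====
-- A's inner `while low <= high` binary search (`mid = (low + high) // 2` inlined).
-- The Python list p is an Array; every index read is nonnegative and in range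
-- (low starts at 1 and only grows past valid probes), so `.toNat` and the getD default are exact here.
def pvBSearch (p : Array Int) (i m2 : Int) (low high pos : Int) : Int :=
  if h : low ≤ high then
    if p.getD (PySem.Int.floordiv (low + high) 2).toNat 0 + i ≤ m2 then
      pvBSearch p i m2 (PySem.Int.floordiv (low + high) 2 + 1) high (PySem.Int.floordiv (low + high) 2)
    else
      pvBSearch p i m2 low (PySem.Int.floordiv (low + high) 2 - 1) pos
  else pos
termination_by (high - low + 1).toNat
decreasing_by
  all_goals (have hb := PySem.Int.floordiv_two_mid_bounds h; omega)

-- one iteration of A's `for i in range(2, 2*n+1)` loop; the Python sieve list is an Array,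
-- indices i ≥ 2 and j ≥ 4 are always nonnegative and in range, so `.toNat`/setIfInBounds are exact
def pvStepA (n : Int) (st : Array Bool × Array Int × Int) (i : Int) : Array Bool × Array Int × Int :=
  if st.1.getD i.toNat false = false then
    let sieve := (PySem.List.pyRange (2 * i) (2 * n + 1) i).foldl (fun s j => s.setIfInBounds j.toNat true) st.1
    let p := st.2.1.push i
    let pos := pvBSearch p i (2 * n) 1 ((p.size : Int) - 1) (-1)
    (sieve, p, st.2.2 + max pos 0)
  else st

def f_func (n : Int) : Int :=
  let sieve0 := ((Array.replicate (2 * n + 2).toNat false).setIfInBounds 0 true).setIfInBounds 1 true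
  let st := (PySem.List.pyRange 2 (2 * n + 1) 1).foldl (pvStepA n) (sieve0, (#[] : Array Int), (1 : Int))
  st.2.2

-- ===== PORT B =====
-- one iteration of B's sieve loop (B's sieve is the same as A's; it only collects the primes)
def pvStepB (n : Int) (st : Array Bool × Array Int) (i : Int) : Array Bool × Array Int :=
  if st.1.getD i.toNat false = false then
    ((PySem.List.pyRange (2 * i) (2 * n + 1) i).foldl (fun s j => s.setIfInBounds j.toNat true) st.1,
     st.2.push i)
  else st

-- B's `while r >= 0 and primes[r] > t` pointer decrement (primes[r] is read only when 0 ≤ r < size)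
def pvDropR (primes : Array Int) (t : Int) (r : Int) : Int :=
  if h : 0 ≤ r ∧ t < primes.getD r.toNat 0 then pvDropR primes t (r - 1) else r
termination_by (r + 1).toNat
decreasing_by omega

-- one iteration of B's `for k in range(len(primes))` sweep (q = primes[k]; k is always in range)
def pvCountStep (primes : Array Int) (m2 : Int) (st : Int × Int) (k : Int) : Int × Int :=
  let q := primes.getD k.toNat 0
  let r := pvDropR primes (m2 - q) st.2
  let pos := min k r
  (if 1 ≤ pos then st.1 + pos else st.1, r)

def f_func_alt (n : Int) : Int :=
  let m := 2 * n
  let sieve0 := ((Array.replicate (m + 2).toNat false).setIfInBounds 0 true).setIfInBounds 1 true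
  let primes := ((PySem.List.pyRange 2 (m + 1) 1).foldl (pvStepB n) (sieve0, (#[] : Array Int))).2
  let res := (PySem.List.pyRange 0 (primes.size : Int) 1).foldl
      (pvCountStep primes m) ((1 : Int), (primes.size : Int) - 1)
  res.1

-- ===== PRECONDITION & SPEC =====
-- Python A raises IndexError for negative n (the sieve list is empty, so its initial assignments fail); B raises there too.
def Pre_f_func (n : Int) : Prop := 0 ≤ n
instance (n : Int) : Decidable (Pre_f_func n) := by unfold Pre_f_func; infer_instance
def pvWitness_f_func : Int := 5

def Spec_f_func (n : Int) (out : Int) : Prop := out = f_func_alt n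
instance (n : Int) (out : Int) : Decidable (Spec_f_func n out) := by unfold Spec_f_func; infer_instance

-- ===== CLAIM (what is proved, stated in full; the proofs are below) =====
def Claim_equal_f_func : Prop := ∀ (n : Int), Dom_f_func n → Pre_f_func n → Spec_f_func n (f_func n)

-- ===== LEMMAS AND PROOFS =====

-- list-level mirrors of the ports' loops (the Array ports are bridged to these below)
def pvLBSearch (p : List Int) (i m2 : Int) (low high pos : Int) : Int :=
  if h : low ≤ high then
    if PySem.List.pyGetD p (PySem.Int.floordiv (low + high) 2) 0 + i ≤ m2 then
      pvLBSearch p i m2 (PySem.Int.floordiv (low + high) 2 + 1) high (PySem.Int.floordiv (low + high) 2)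
    else
      pvLBSearch p i m2 low (PySem.Int.floordiv (low + high) 2 - 1) pos
  else pos
termination_by (high - low + 1).toNat
decreasing_by
  all_goals (have hb := PySem.Int.floordiv_two_mid_bounds h; omega)

def pvLStepA (n : Int) (st : List Bool × List Int × Int) (i : Int) : List Bool × List Int × Int :=
  if PySem.List.pyGetD st.1 i false = false then
    let sieve := (PySem.List.pyRange (2 * i) (2 * n + 1) i).foldl (fun s j => s.set j.toNat true) st.1
    let p := st.2.1 ++ [i]
    let pos := pvLBSearch p i (2 * n) 1 ((p.length : Int) - 1) (-1)
    (sieve, p, st.2.2 + max pos 0)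
  else st

def pvLStepB (n : Int) (st : List Bool × List Int) (i : Int) : List Bool × List Int :=
  if PySem.List.pyGetD st.1 i false = false then
    ((PySem.List.pyRange (2 * i) (2 * n + 1) i).foldl (fun s j => s.set j.toNat true) st.1,
     st.2 ++ [i])
  else st

def pvLDropR (primes : List Int) (t : Int) (r : Int) : Int :=
  if h : 0 ≤ r ∧ t < PySem.List.pyGetD primes r 0 then pvLDropR primes t (r - 1) else r
termination_by (r + 1).toNat
decreasing_by omega

def pvLCountStep (primes : List Int) (m2 : Int) (st : Int × Int) (kq : Int × Int) : Int × Int :=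
  let r := pvLDropR primes (m2 - kq.2) st.2
  let pos := min kq.1 r
  (if 1 ≤ pos then st.1 + pos else st.1, r)

-- Array/List bridges
lemma arr_getD {α : Type} (a : Array α) (i : Nat) (d : α) : a.getD i d = a.toList.getD i d := by
  rw [List.getD, Array.getD_eq_getD_getElem?]
  congr 1
  exact (Array.getElem?_toList).symm

lemma getD_bridge {α : Type} (a : Array α) (i : Int) (hi : 0 ≤ i) (d : α) :
    a.getD i.toNat d = PySem.List.pyGetD a.toList i d := by
  rw [arr_getD, ← PySem.List.pyGetD_natCast, Int.toNat_of_nonneg hi]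

lemma sieve_fold_bridge (l : List Int) : ∀ (a : Array Bool),
    (l.foldl (fun s j => s.setIfInBounds j.toNat true) a).toList =
      l.foldl (fun s j => s.set j.toNat true) a.toList := by
  induction l with
  | nil => intro a; rfl
  | cons j l ih =>
    intro a
    simp only [List.foldl_cons]
    rw [ih, Array.toList_setIfInBounds]

lemma bsearch_bridge (p : Array Int) (i m2 : Int) : ∀ (low high pos : Int), 0 ≤ low →
    pvBSearch p i m2 low high pos = pvLBSearch p.toList i m2 low high pos := by
  intro low high pos
  induction low, high, pos using pvBSearch.induct p i m2 with
  | case1 low high pos h hcond ih =>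
    intro hl
    rw [pvBSearch, pvLBSearch, dif_pos h, dif_pos h]
    have hb := PySem.Int.floordiv_two_mid_bounds h
    rw [← getD_bridge p _ (by omega)]
    rw [if_pos hcond, if_pos hcond]
    exact ih (by omega)
  | case2 low high pos h hcond ih =>
    intro hl
    rw [pvBSearch, pvLBSearch, dif_pos h, dif_pos h]
    have hb := PySem.Int.floordiv_two_mid_bounds h
    rw [← getD_bridge p _ (by omega)]
    rw [if_neg hcond, if_neg hcond]
    exact ih hl
  | case3 low high pos h =>
    intro _
    rw [pvBSearch, pvLBSearch, dif_neg h, dif_neg h]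

lemma dropR_bridge (p : Array Int) (t : Int) : ∀ (r : Int),
    pvDropR p t r = pvLDropR p.toList t r := by
  intro r
  induction r using pvDropR.induct p t with
  | case1 r h ih =>
    rw [pvDropR, pvLDropR, dif_pos h, dif_pos (by rwa [← getD_bridge p r h.1])]
    exact ih
  | case2 r h =>
    by_cases hr : 0 ≤ r
    · rw [pvDropR, pvLDropR, dif_neg h, dif_neg (by rwa [← getD_bridge p r hr])]
    · rw [pvDropR, pvLDropR, dif_neg h, dif_neg (by intro hc; exact hr hc.1)]

lemma countStep_bridge (p : Array Int) (m2 : Int) (st : Int × Int) (k : Int) (hk : 0 ≤ k) :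
    pvCountStep p m2 st k = pvLCountStep p.toList m2 st (k, PySem.List.pyGetD p.toList k 0) := by
  simp only [pvCountStep, pvLCountStep]
  rw [dropR_bridge, getD_bridge p k hk]

lemma stepA_bridge (n : Int) (st : Array Bool × Array Int × Int) (i : Int) (hi : 0 ≤ i) :
    ((pvStepA n st i).1.toList, (pvStepA n st i).2.1.toList, (pvStepA n st i).2.2) =
      pvLStepA n (st.1.toList, st.2.1.toList, st.2.2) i := by
  unfold pvStepA pvLStepA
  rw [← getD_bridge st.1 i hi]
  split_ifs with hc
  · simp only []
    rw [sieve_fold_bridge, Array.toList_push,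
        bsearch_bridge _ _ _ _ _ _ (by omega), Array.toList_push]
    have : ((st.2.1.push i).size : Int) = ((st.2.1.toList ++ [i]).length : Int) := by
      rw [Array.size_push, Array.size_eq_length_toList]; simp
    rw [this]
  · rfl

lemma stepB_bridge (n : Int) (st : Array Bool × Array Int) (i : Int) (hi : 0 ≤ i) :
    ((pvStepB n st i).1.toList, (pvStepB n st i).2.toList) =
      pvLStepB n (st.1.toList, st.2.toList) i := by
  unfold pvStepB pvLStepB
  rw [← getD_bridge st.1 i hi]
  split_ifs with hc
  · simp only []
    rw [sieve_fold_bridge, Array.toList_push]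
  · rfl

lemma foldA_bridge (n : Int) (l : List Int) (hl : ∀ x ∈ l, 0 ≤ x) :
    ∀ (a : Array Bool) (p : Array Int) (ans : Int),
    ((l.foldl (pvStepA n) (a, p, ans)).1.toList,
     (l.foldl (pvStepA n) (a, p, ans)).2.1.toList,
     (l.foldl (pvStepA n) (a, p, ans)).2.2) =
      l.foldl (pvLStepA n) (a.toList, p.toList, ans) := by
  induction l with
  | nil => intro a p ans; rfl
  | cons i l ih =>
    intro a p ans
    simp only [List.foldl_cons]
    rw [← stepA_bridge n (a, p, ans) i (hl i List.mem_cons_self)]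
    exact ih (fun x hx => hl x (List.mem_cons_of_mem _ hx)) _ _ _

lemma foldB_bridge (n : Int) (l : List Int) (hl : ∀ x ∈ l, 0 ≤ x) :
    ∀ (a : Array Bool) (p : Array Int),
    ((l.foldl (pvStepB n) (a, p)).1.toList, (l.foldl (pvStepB n) (a, p)).2.toList) =
      l.foldl (pvLStepB n) (a.toList, p.toList) := by
  induction l with
  | nil => intro a p; rfl
  | cons i l ih =>
    intro a p
    simp only [List.foldl_cons]
    rw [← stepB_bridge n (a, p) i (hl i List.mem_cons_self)]
    exact ih (fun x hx => hl x (List.mem_cons_of_mem _ hx)) _ _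


def pvCnt (P : List Int) (t : Int) : Nat := P.countP (fun x => decide (x ≤ t))

lemma cnt_char (P : List Int) (hs : P.Pairwise (· ≤ ·)) (t : Int) (k : Nat) (hk : k < P.length) :
    P[k] ≤ t ↔ k < pvCnt P t := by
  induction P generalizing k with
  | nil => simp at hk
  | cons x xs ih =>
    rcases List.pairwise_cons.mp hs with ⟨hx, hxs⟩
    rcases k with _ | k
    · simp only [List.getElem_cons_zero]
      unfold pvCnt
      rw [List.countP_cons]
      constructor
      · intro h; simp [h]
      · intro h
        by_contra hxt
        rw [(by simp [List.countP_eq_zero]; intro a ha; have := hx a ha; omega :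
          xs.countP (fun x => decide (x ≤ t)) = 0)] at h
        simp [hxt] at h
    · simp only [List.getElem_cons_succ]
      have hk' : k < xs.length := by simpa using hk
      rw [ih hxs k hk']
      unfold pvCnt
      rw [List.countP_cons]
      by_cases hxt : x ≤ t
      · simp [hxt]
      · have h0 : xs.countP (fun x => decide (x ≤ t)) = 0 := by
          simp [List.countP_eq_zero]; intro a ha; have := hx a ha; omega
        unfold pvCnt at *
        rw [h0]
        simp [hxt]

lemma cnt_take (P : List Int) (hs : P.Pairwise (· ≤ ·)) (t : Int) (s : Nat) :
    pvCnt (P.take s) t = min s (pvCnt P t) := by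
  induction P generalizing s with
  | nil => simp [pvCnt]
  | cons x xs ih =>
    rcases List.pairwise_cons.mp hs with ⟨hx, hxs⟩
    rcases s with _ | s
    · simp [pvCnt]
    · simp only [List.take_succ_cons]
      unfold pvCnt at *
      rw [List.countP_cons, List.countP_cons, ih hxs s]
      by_cases hxt : x ≤ t
      · simp [hxt]
      · have h0 : xs.countP (fun x => decide (x ≤ t)) = 0 := by
          simp [List.countP_eq_zero]; intro a ha; have := hx a ha; omega
        have h1 : (xs.take s).countP (fun x => decide (x ≤ t)) = 0 := by
          simp [List.countP_eq_zero]; intro a ha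
          have := hx a (List.mem_of_mem_take ha); omega
        simp [hxt, h0]

lemma bsearch_spec (p : List Int) (hs : p.Pairwise (· ≤ ·)) (q m2 : Int)
    (low high pos : Int) (hl : 0 ≤ low) (hh : high ≤ (p.length : Int) - 1) :
    pvLBSearch p q m2 low high pos =
      if low ≤ (pvCnt p (m2 - q) : Int) - 1 ∧ low ≤ high
      then min ((pvCnt p (m2 - q) : Int) - 1) high else pos := by
  have hcl : (pvCnt p (m2 - q) : Int) ≤ (p.length : Int) := by
    exact_mod_cast List.countP_le_length
  revert hl hh
  induction low, high, pos using pvLBSearch.induct p q m2 with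
  | case1 low high pos h hcond ih =>
    intro hl hh
    obtain ⟨mid, hmid⟩ : ∃ mid, mid = PySem.Int.floordiv (low + high) 2 := ⟨_, rfl⟩
    rw [← hmid] at hcond ih
    have hb : low ≤ mid ∧ mid ≤ high := by rw [hmid]; exact PySem.Int.floordiv_two_mid_bounds h
    have hmlt : mid.toNat < p.length := by omega
    have hget : PySem.List.pyGetD p mid 0 = p[mid.toNat] :=
      PySem.List.pyGetD_eq_getElem _ 0 (by omega) (by omega)
    have hc : mid < (pvCnt p (m2 - q) : Int) := by
      have := (cnt_char p hs (m2 - q) mid.toNat hmlt).mp (by rw [hget] at hcond; omega)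
      omega
    rw [pvLBSearch, dif_pos h, ← hmid, if_pos hcond, ih (by omega) hh]
    split_ifs <;> omega
  | case2 low high pos h hcond ih =>
    intro hl hh
    obtain ⟨mid, hmid⟩ : ∃ mid, mid = PySem.Int.floordiv (low + high) 2 := ⟨_, rfl⟩
    rw [← hmid] at hcond ih
    have hb : low ≤ mid ∧ mid ≤ high := by rw [hmid]; exact PySem.Int.floordiv_two_mid_bounds h
    have hmlt : mid.toNat < p.length := by omega
    have hget : PySem.List.pyGetD p mid 0 = p[mid.toNat] :=
      PySem.List.pyGetD_eq_getElem _ 0 (by omega) (by omega)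
    have hc : (pvCnt p (m2 - q) : Int) ≤ mid := by
      by_contra hcc
      have := (cnt_char p hs (m2 - q) mid.toNat hmlt).mpr (by omega)
      rw [hget] at hcond; omega
    rw [pvLBSearch, dif_pos h, ← hmid, if_neg hcond, ih hl (by omega)]
    split_ifs <;> omega
  | case3 low high pos h =>
    intro hl hh
    rw [pvLBSearch, dif_neg h]
    split_ifs <;> omega

lemma dropR_spec (P : List Int) (hs : P.Pairwise (· ≤ ·)) (t : Int) : ∀ (r : Int),
    -1 ≤ r → r ≤ (P.length : Int) - 1 → (pvCnt P t : Int) - 1 ≤ r →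
    pvLDropR P t r = (pvCnt P t : Int) - 1 := by
  intro r
  induction r using pvLDropR.induct P t with
  | case1 r h ih =>
    intro h1 h2 h3
    have hrl : r.toNat < P.length := by omega
    have hget : PySem.List.pyGetD P r 0 = P[r.toNat] :=
      PySem.List.pyGetD_eq_getElem _ 0 (by omega) (by omega)
    have hc : (pvCnt P t : Int) ≤ r := by
      by_contra hcc
      have := (cnt_char P hs t r.toNat hrl).mpr (by omega)
      rw [hget] at h; omega
    rw [pvLDropR, dif_pos h]
    exact ih (by omega) (by omega) (by omega)
  | case2 r h =>
    intro h1 h2 h3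
    rw [pvLDropR, dif_neg h]
    rcases (not_and_or.mp h) with h4 | h4
    · -- r < 0, so r = -1 and pvCnt P t = 0
      have : pvCnt P t = 0 := by omega
      omega
    · by_cases hr0 : 0 ≤ r
      case neg => omega
      have hrl : r.toNat < P.length := by omega
      have hget : PySem.List.pyGetD P r 0 = P[r.toNat] :=
        PySem.List.pyGetD_eq_getElem _ 0 (by omega) (by omega)
      have : r < (pvCnt P t : Int) := by
        have := (cnt_char P hs t r.toNat hrl).mp (by rw [hget] at h4; omega)
        omega
      omega

def pvSumC (m2 : Int) (p e : List Int) : Int :=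
  match e with
  | [] => 0
  | q :: e' =>
      max (pvLBSearch (p ++ [q]) q m2 1 ((p.length : Int)) (-1)) 0 + pvSumC m2 (p ++ [q]) e'

def pvTerm (m2 : Int) (P : List Int) (k : Nat) : Int :=
  max (min (k : Int) ((pvCnt P (m2 - P.getD k 0) : Int) - 1)) 0

def pvSum (m2 : Int) (P : List Int) : Int :=
  ((List.range P.length).map (pvTerm m2 P)).sum

lemma foldB_prefix (n : Int) (l : List Int) : ∀ sv p, ∃ e,
    (l.foldl (pvLStepB n) (sv, p)).2 = p ++ e := by
  induction l with
  | nil => intro sv p; exact ⟨[], by simp⟩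
  | cons i l ih =>
    intro sv p
    simp only [List.foldl_cons]
    unfold pvLStepB
    split_ifs with hc
    · obtain ⟨e, he⟩ := ih _ (p ++ [i])
      exact ⟨i :: e, by simpa using he⟩
    · exact ih sv p

lemma foldA_eq (n : Int) (l : List Int) : ∀ sv p ans,
    l.foldl (pvLStepA n) (sv, p, ans) =
      ((l.foldl (pvLStepB n) (sv, p)).1, (l.foldl (pvLStepB n) (sv, p)).2,
        ans + pvSumC (2 * n) p ((l.foldl (pvLStepB n) (sv, p)).2.drop p.length)) := by
  induction l with
  | nil => intro sv p ans; simp [pvSumC]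
  | cons i l ih =>
    intro sv p ans
    simp only [List.foldl_cons]
    by_cases hc : PySem.List.pyGetD sv i false = false
    · rw [show pvLStepA n (sv, p, ans) i =
        ((PySem.List.pyRange (2 * i) (2 * n + 1) i).foldl (fun s j => s.set j.toNat true) sv,
         p ++ [i],
         ans + max (pvLBSearch (p ++ [i]) i (2 * n) 1 (((p ++ [i]).length : Int) - 1) (-1)) 0)
        from by simp [pvLStepA, hc]]
      rw [show pvLStepB n (sv, p) i =
        ((PySem.List.pyRange (2 * i) (2 * n + 1) i).foldl (fun s j => s.set j.toNat true) sv,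
         p ++ [i]) from by simp [pvLStepB, hc]]
      rw [ih]
      obtain ⟨e, he⟩ :=
        foldB_prefix n l ((PySem.List.pyRange (2 * i) (2 * n + 1) i).foldl (fun s j => s.set j.toNat true) sv) (p ++ [i])
      rw [he]
      refine congrArg _ (congrArg _ ?_)
      have hdrop1 : ((p ++ [i]) ++ e).drop p.length = i :: e := by
        rw [List.append_assoc]; simp
      have hdrop2 : ((p ++ [i]) ++ e).drop (p ++ [i]).length = e := by
        simp
      rw [hdrop1, hdrop2]
      show ans + max (pvLBSearch (p ++ [i]) i (2 * n) 1 (((p ++ [i]).length : Int) - 1) (-1)) 0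
            + pvSumC (2 * n) (p ++ [i]) e
         = ans + pvSumC (2 * n) p (i :: e)
      rw [show pvSumC (2 * n) p (i :: e) =
            max (pvLBSearch (p ++ [i]) i (2 * n) 1 ((p.length : Int)) (-1)) 0
              + pvSumC (2 * n) (p ++ [i]) e from rfl]
      have : (((p ++ [i]).length : Int) - 1) = (p.length : Int) := by
        simp
      rw [this]
      ring
    · rw [show pvLStepA n (sv, p, ans) i = (sv, p, ans) from by simp [pvLStepA, hc],
          show pvLStepB n (sv, p) i = (sv, p) from by simp [pvLStepB, hc]]
      exact ih sv p ans

lemma foldB_sorted (n : Int) (l : List Int) : ∀ sv p,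
    l.Pairwise (· < ·) → (∀ x ∈ p, ∀ y ∈ l, x < y) → p.Pairwise (· < ·) →
    (∀ x ∈ (l.foldl (pvLStepB n) (sv, p)).2, x ∈ p ∨ x ∈ l) ∧
      ((l.foldl (pvLStepB n) (sv, p)).2.Pairwise (· < ·)) := by
  induction l with
  | nil =>
    intro sv p _ _ hp
    exact ⟨fun x hx => Or.inl hx, hp⟩
  | cons i l ih =>
    intro sv p hl hpl hp
    rcases List.pairwise_cons.mp hl with ⟨hil, hl'⟩
    simp only [List.foldl_cons]
    by_cases hc : PySem.List.pyGetD sv i false = false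
    · rw [show pvLStepB n (sv, p) i =
        ((PySem.List.pyRange (2 * i) (2 * n + 1) i).foldl (fun s j => s.set j.toNat true) sv,
         p ++ [i]) from by simp [pvLStepB, hc]]
      have h1 : ∀ x ∈ p ++ [i], ∀ y ∈ l, x < y := by
        intro x hx y hy
        rcases List.mem_append.mp hx with hx | hx
        · exact hpl x hx y (List.mem_cons_of_mem _ hy)
        · simp at hx; subst hx; exact hil y hy
      have h2 : (p ++ [i]).Pairwise (· < ·) := by
        rw [List.pairwise_append]
        refine ⟨hp, List.pairwise_singleton _ _, ?_⟩
        intro x hx y hy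
        simp at hy; subst hy
        exact hpl x hx _ List.mem_cons_self
      obtain ⟨hmem, hsort⟩ := ih _ (p ++ [i]) hl' h1 h2
      refine ⟨?_, hsort⟩
      intro x hx
      rcases hmem x hx with hx' | hx'
      · rcases List.mem_append.mp hx' with h | h
        · exact Or.inl h
        · simp at h; subst h; exact Or.inr List.mem_cons_self
      · exact Or.inr (List.mem_cons_of_mem _ hx')
    · rw [show pvLStepB n (sv, p) i = (sv, p) from by simp [pvLStepB, hc]]
      have h1 : ∀ x ∈ p, ∀ y ∈ l, x < y := fun x hx y hy => hpl x hx y (List.mem_cons_of_mem _ hy)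
      obtain ⟨hmem, hsort⟩ := ih sv p hl' h1 hp
      exact ⟨fun x hx => (hmem x hx).imp id (List.mem_cons_of_mem _), hsort⟩

lemma cnt_le_length (P : List Int) (t : Int) : pvCnt P t ≤ P.length :=
  List.countP_le_length

lemma cnt_mono (P : List Int) {t t' : Int} (h : t ≤ t') : pvCnt P t ≤ pvCnt P t' := by
  unfold pvCnt
  apply List.countP_mono_left
  intro x _ hx
  simp_all
  omega

lemma sumC_aux (m2 : Int) (P : List Int) (hs : P.Pairwise (· ≤ ·)) : ∀ (d k : Nat),
    P.length - k = d →
    pvSumC m2 (P.take k) (P.drop k) = ((List.range d).map (fun j => pvTerm m2 P (k + j))).sum := by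
  intro d
  induction d with
  | zero =>
    intro k hk
    rw [List.drop_eq_nil_of_le (by omega)]
    simp [pvSumC]
  | succ d ihd =>
    intro k hk
    have hkl : k < P.length := by omega
    rw [List.drop_eq_getElem_cons hkl]
    rw [show pvSumC m2 (P.take k) (P[k] :: P.drop (k + 1)) =
          max (pvLBSearch (P.take k ++ [P[k]]) P[k] m2 1 (((P.take k).length : Int)) (-1)) 0
            + pvSumC m2 (P.take k ++ [P[k]]) (P.drop (k + 1)) from rfl]
    rw [← List.take_succ_eq_append_getElem hkl]
    have hlen : ((P.take k).length : Int) = (k : Int) := by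
      simp [List.length_take]; omega
    have hlen1 : ((P.take (k + 1)).length : Int) = (k : Int) + 1 := by
      simp [List.length_take]; omega
    have hbs := bsearch_spec (P.take (k + 1)) (hs.take) P[k] m2 1 (k : Int) (-1)
      (by omega) (by omega)
    have hcnt : pvCnt (P.take (k + 1)) (m2 - P[k]) = min (k + 1) (pvCnt P (m2 - P[k])) :=
      cnt_take P hs _ _
    have hterm : max (pvLBSearch (P.take (k + 1)) P[k] m2 1 ((k : Int)) (-1)) 0 = pvTerm m2 P k := by
      rw [hbs, hcnt]
      unfold pvTerm
      rw [List.getD_eq_getElem P 0 hkl]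
      have : pvCnt P (m2 - P[k]) ≤ P.length := cnt_le_length P _
      split_ifs <;> omega
    rw [hlen, hterm, ihd (k + 1) (by omega)]
    rw [List.range_succ_eq_map]
    have hshift : (fun j => pvTerm m2 P (k + (j + 1))) = (fun j => pvTerm m2 P (k + 1 + j)) := by
      funext j; congr 1; omega
    simp only [List.map_cons, List.map_map, List.sum_cons, Function.comp_def, hshift, Nat.add_zero]

lemma sweep_aux (m2 : Int) (P : List Int) (hs : P.Pairwise (· ≤ ·)) : ∀ (d k : Nat) (ans r : Int),
    P.length - k = d → -1 ≤ r → r ≤ (P.length : Int) - 1 →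
    (∀ hk : k < P.length, (pvCnt P (m2 - P[k]) : Int) - 1 ≤ r) →
    ((PySem.List.enumerate (P.drop k) (k : Int)).foldl (pvLCountStep P m2) (ans, r)).1 =
      ans + ((List.range d).map (fun j => pvTerm m2 P (k + j))).sum := by
  intro d
  induction d with
  | zero =>
    intro k ans r hk _ _ _
    rw [List.drop_eq_nil_of_le (by omega)]
    simp [PySem.List.enumerate]
  | succ d ihd =>
    intro k ans r hk h1 h2 h3
    have hkl : k < P.length := by omega
    rw [List.drop_eq_getElem_cons hkl, PySem.List.enumerate_cons, List.foldl_cons]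
    have hdrop := dropR_spec P hs (m2 - P[k]) r h1 h2 (h3 hkl)
    rw [show pvLCountStep P m2 (ans, r) ((k : Int), P[k]) =
          (if 1 ≤ min (k : Int) (pvLDropR P (m2 - P[k]) r) then
             ans + min (k : Int) (pvLDropR P (m2 - P[k]) r) else ans,
           pvLDropR P (m2 - P[k]) r) from rfl]
    rw [hdrop]
    have hcle : pvCnt P (m2 - P[k]) ≤ P.length := cnt_le_length P _
    have hnext : ∀ hk1 : k + 1 < P.length,
        (pvCnt P (m2 - P[k + 1]) : Int) - 1 ≤ (pvCnt P (m2 - P[k]) : Int) - 1 := by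
      intro hk1
      have hmono : P[k] ≤ P[k + 1] :=
        List.pairwise_iff_getElem.mp hs k (k + 1) hkl hk1 (by omega)
      have := cnt_mono P (by omega : m2 - P[k + 1] ≤ m2 - P[k])
      omega
    have := ihd (k + 1) (if 1 ≤ min (k : Int) ((pvCnt P (m2 - P[k]) : Int) - 1) then
             ans + min (k : Int) ((pvCnt P (m2 - P[k]) : Int) - 1) else ans)
          ((pvCnt P (m2 - P[k]) : Int) - 1) (by omega) (by omega) (by omega) hnext
    rw [show ((k : Int) + 1) = ((k + 1 : Nat) : Int) from by push_cast; ring, this]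
    have hterm : (if 1 ≤ min (k : Int) ((pvCnt P (m2 - P[k]) : Int) - 1) then
             ans + min (k : Int) ((pvCnt P (m2 - P[k]) : Int) - 1) else ans)
          = ans + pvTerm m2 P k := by
      unfold pvTerm
      rw [List.getD_eq_getElem P 0 hkl]
      split_ifs <;> omega
    rw [hterm]
    rw [List.range_succ_eq_map]
    have hshift : (fun j => pvTerm m2 P (k + (j + 1))) = (fun j => pvTerm m2 P (k + 1 + j)) := by
      funext j; congr 1; omega
    simp only [List.map_cons, List.map_map, List.sum_cons, Function.comp_def, hshift, Nat.add_zero]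
    ring


-- ===== VERDICT (by name: the statement is the Claim_ definition above) =====
theorem f_func_spec : Claim_equal_f_func := by
  intro n _ _
  unfold Spec_f_func
  set L := PySem.List.pyRange 2 (2 * n + 1) 1 with hL
  have hLpos : ∀ x ∈ L, 0 ≤ x := by
    intro x hx
    rw [hL] at hx
    have := PySem.List.mem_pyRange_one.mp hx
    omega
  set a0 := ((Array.replicate (2 * n + 2).toNat false).setIfInBounds 0 true).setIfInBounds 1 true
    with ha0
  set sv0 := ((List.replicate (2 * n + 2).toNat false).set 0 true).set 1 true with hsv
  have hinit : a0.toList = sv0 := by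
    rw [ha0, hsv]
    simp [Array.toList_setIfInBounds]
  set P := (L.foldl (pvLStepB n) (sv0, ([] : List Int))).2 with hP
  have hsorted' : P.Pairwise (· < ·) :=
    (foldB_sorted n L sv0 [] (PySem.List.pairwise_lt_pyRange_one 2 (2 * n + 1)) (by simp) (by simp)).2
  have hsorted : P.Pairwise (· ≤ ·) := hsorted'.imp le_of_lt
  have hb := foldB_bridge n L hLpos a0 #[]
  have hPP : ((L.foldl (pvStepB n) (a0, #[])).2).toList = P := by
    have := congrArg (fun t => t.2) hb
    simpa [hinit, hP] using this
  have hA : f_func n = 1 + pvSumC (2 * n) [] P := by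
    show (L.foldl (pvStepA n) (a0, (#[] : Array Int), (1 : Int))).2.2 = _
    have h3 := congrArg (fun t => t.2.2) (foldA_bridge n L hLpos a0 #[] 1)
    simp only [hinit] at h3
    rw [h3, foldA_eq]
    simp [hP]
  have hB : f_func_alt n = 1 + pvSum (2 * n) P := by
    show ((PySem.List.pyRange 0 ((((L.foldl (pvStepB n) (a0, #[])).2).size : Nat) : Int) 1).foldl
        (pvCountStep ((L.foldl (pvStepB n) (a0, #[])).2) (2 * n))
        ((1 : Int), (((L.foldl (pvStepB n) (a0, #[])).2).size : Int) - 1)).1 = _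
    rw [Array.size_eq_length_toList, hPP,
        PySem.List.foldl_congr_mem _ _
          (fun st k => pvLCountStep P (2 * n) st (k, PySem.List.pyGetD P k 0)) _
          (fun st k hk => by
            rw [countStep_bridge _ _ _ _ (by
              have := PySem.List.mem_pyRange_one.mp hk; omega), hPP])]
    have hmap := List.foldl_map (f := fun k : Int => (k, PySem.List.pyGetD P k 0))
      (g := pvLCountStep P (2 * n)) (l := PySem.List.pyRange 0 ((P.length : Nat) : Int) 1)
      (init := ((1 : Int), (P.length : Int) - 1))
    rw [← hmap,
        show List.map (fun k : Int => (k, PySem.List.pyGetD P k 0))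
              (PySem.List.pyRange 0 ((P.length : Nat) : Int) 1)
            = PySem.List.enumerate P 0 from (PySem.List.enumerate_eq_map_pyRange (xs := P) 0).symm]
    have h3 : ∀ hk : 0 < P.length, (pvCnt P (2 * n - P[0]) : Int) - 1 ≤ (P.length : Int) - 1 := by
      intro hk
      have := cnt_le_length P (2 * n - P[0])
      omega
    have := sweep_aux (2 * n) P hsorted P.length 0 1 ((P.length : Int) - 1)
      (by omega) (by omega) (by omega) h3
    simp only [List.drop_zero, Nat.cast_zero] at this
    rw [this]
    simp [pvSum]
  have hAB : pvSumC (2 * n) [] P = pvSum (2 * n) P := by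
    have := sumC_aux (2 * n) P hsorted P.length 0 (by omega)
    simp only [List.take_zero, List.drop_zero, Nat.zero_add] at this
    rw [this]
    simp [pvSum]
  rw [hA, hB, hAB]
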